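-- pv_equiv track=rewrite | github.com/grudolf/aoc2025 | day10.py | convert_to_bits
-- ===== SOURCE A (Python) =====
-- def convert_to_bits(state, buttons):
--     desired_state = 0
--     for s in state:
--         desired_state += s
--         desired_state *= 2 #shift left
--     desired_state //= 2 #one shift too many
--
--     button_values = []
--     for button in buttons:
--         button_value = 0
--         for b in button:
--             bit = len(state) - b - 1
--             button_value += 2 ** bit
--         button_values.append(button_value)
--     return desired_state, button_values
-- ===== SOURCE B (Python) =====
-- def convert_to_bits(state, buttons):
--     n = len(state)
--     desired_state = 0
--     power = 1
--     for s in reversed(state):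
--         desired_state += s * power
--         power *= 2
--     button_values = [sum(2 ** (n - b - 1) for b in button) for button in buttons]
--     return desired_state, button_values
-- ===== Notes on version B (the rewrite author's own statement) =====
-- stated objective: alternative
-- what changed: Replaces the Horner-style multiply-by-2 accumulation with its extra-shift floor-division correction by a back-to-front pass that keeps an explicit power-of-two accumulator, and builds the button values by direct summation instead of an append loop.
-- outside the precondition, e.g. on convert_to_bits([0], [[5]]): A returns (0, [0.03125]), B returns (0, [0.03125])
import Mathlib
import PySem

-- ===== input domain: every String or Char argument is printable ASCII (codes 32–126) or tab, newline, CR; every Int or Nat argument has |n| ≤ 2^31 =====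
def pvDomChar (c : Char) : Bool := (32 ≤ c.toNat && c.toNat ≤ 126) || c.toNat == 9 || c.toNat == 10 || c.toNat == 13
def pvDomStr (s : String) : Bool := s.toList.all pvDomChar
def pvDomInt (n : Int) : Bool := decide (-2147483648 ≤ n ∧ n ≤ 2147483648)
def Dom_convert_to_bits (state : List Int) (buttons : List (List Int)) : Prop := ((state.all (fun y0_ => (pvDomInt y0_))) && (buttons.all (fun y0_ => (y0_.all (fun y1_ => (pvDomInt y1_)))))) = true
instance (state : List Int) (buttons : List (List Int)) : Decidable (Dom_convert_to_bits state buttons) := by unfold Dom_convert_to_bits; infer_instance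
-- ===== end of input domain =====

-- B replaces A's Horner-style multiply-by-2 loop plus extra-shift correction by a
-- back-to-front pass with an explicit power accumulator, and builds button values by
-- direct summation instead of an append loop (alternative decomposition, same cost).

-- ===== PORT A =====
def convert_to_bits (state : List Int) (buttons : List (List Int)) : Int × List Int :=
  let desired0 := state.foldl (fun d s => (d + s) * 2) 0
  let desired := PySem.Int.floordiv desired0 2
  let button_values := buttons.foldl (fun acc button =>
    acc ++ [button.foldl (fun v b => v + 2 ^ (((state.length : Int) - b - 1).toNat)) 0]) []
  (desired, button_values)

-- ===== PORT B =====
def convert_to_bits_alt (state : List Int) (buttons : List (List Int)) : Int × List Int :=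
  let n : Int := state.length
  let dp := state.reverse.foldl (fun (dp : Int × Int) s => (dp.1 + s * dp.2, dp.2 * 2)) (0, 1)
  (dp.1, buttons.map (fun button => (button.map (fun b => (2 : Int) ^ ((n - b - 1).toNat))).sum))

-- ===== PRECONDITION & SPEC =====
-- Pre_ excludes inputs where some button entry b satisfies b ≥ len(state): there the
-- Python exponent len(state)-b-1 is negative, so 2**bit is a FLOAT and both programs
-- return a value outside the declared type Int × List Int.
def Pre_convert_to_bits (state : List Int) (buttons : List (List Int)) : Prop :=
  ∀ button ∈ buttons, ∀ b ∈ button, b < (state.length : Int)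
instance (state : List Int) (buttons : List (List Int)) : Decidable (Pre_convert_to_bits state buttons) := by unfold Pre_convert_to_bits; infer_instance

def pvWitness_convert_to_bits : List Int × List (List Int) := ([1, 0, 1], [[0, 2], [1]])

def Spec_convert_to_bits (state : List Int) (buttons : List (List Int)) (out : Int × List Int) : Prop := out = convert_to_bits_alt state buttons
instance (state : List Int) (buttons : List (List Int)) (out : Int × List Int) : Decidable (Spec_convert_to_bits state buttons out) := by unfold Spec_convert_to_bits; infer_instance

-- ===== CLAIM (what is proved, stated in full; the proofs are below) =====
def Claim_equal_convert_to_bits : Prop := ∀ (state : List Int) (buttons : List (List Int)), Dom_convert_to_bits state buttons → Pre_convert_to_bits state buttons → Spec_convert_to_bits state buttons (convert_to_bits state buttons)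

-- ===== LEMMAS AND PROOFS =====

-- shifting the accumulator out of A's Horner fold
theorem horner_shift (xs : List Int) (d : Int) :
    xs.foldl (fun d s => (d + s) * 2) d
      = 2 ^ xs.length * d + xs.foldl (fun d s => (d + s) * 2) 0 := by
  induction xs generalizing d with
  | nil => simp
  | cons x xs ih =>
    simp only [List.foldl_cons, List.length_cons]
    rw [ih ((d + x) * 2), ih ((0 + x) * 2)]
    ring

-- B's reversed fold computes (weighted sum, 2^length) and its first component is half of A's fold
theorem rev_fold_char (xs : List Int) :
    (xs.reverse.foldl (fun (dp : Int × Int) s => (dp.1 + s * dp.2, dp.2 * 2)) (0, 1)).2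
        = 2 ^ xs.length
    ∧ 2 * (xs.reverse.foldl (fun (dp : Int × Int) s => (dp.1 + s * dp.2, dp.2 * 2)) (0, 1)).1
        = xs.foldl (fun d s => (d + s) * 2) 0 := by
  rw [List.foldl_reverse]
  induction xs with
  | nil => simp
  | cons x xs ih =>
    obtain ⟨ih2, ih1⟩ := ih
    simp only [List.foldr_cons, List.length_cons, List.foldl_cons]
    constructor
    · rw [ih2]; ring
    · rw [horner_shift xs ((0 + x) * 2), ← ih1, ih2]; ring

theorem fold_append_map (buttons : List (List Int)) (f : List Int → Int) (acc : List Int) :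
    buttons.foldl (fun acc button => acc ++ [f button]) acc = acc ++ buttons.map f := by
  induction buttons generalizing acc with
  | nil => simp
  | cons b bs ih => simp [ih]

theorem fold_add_sum (e : Int → Int) (l : List Int) (a : Int) :
    l.foldl (fun v b => v + e b) a = a + (l.map e).sum := by
  induction l generalizing a with
  | nil => simp
  | cons x xs ih => simp [ih]; ring

-- ===== VERDICT (by name: the statement is the Claim_ definition above) =====
theorem convert_to_bits_spec : Claim_equal_convert_to_bits := by
  intro state buttons _ _
  unfold Spec_convert_to_bits convert_to_bits convert_to_bits_alt
  obtain ⟨h2, h1⟩ := rev_fold_char state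
  refine Prod.ext ?_ ?_
  · show PySem.Int.floordiv (state.foldl (fun d s => (d + s) * 2) 0) 2
        = (state.reverse.foldl (fun (dp : Int × Int) s => (dp.1 + s * dp.2, dp.2 * 2)) (0, 1)).1
    rw [← h1]
    rw [PySem.Int.floordiv_eq_ediv_of_pos (by norm_num)]
    omega
  · show buttons.foldl (fun acc button => acc ++ [button.foldl (fun v b => v + 2 ^ (((state.length : Int) - b - 1).toNat)) 0]) []
        = buttons.map (fun button => (button.map (fun b => (2 : Int) ^ (((state.length : Int) - b - 1).toNat))).sum)
    rw [fold_append_map buttons (fun button => button.foldl (fun v b => v + 2 ^ (((state.length : Int) - b - 1).toNat)) 0) []]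
    simp only [List.nil_append]
    apply List.map_congr_left
    intro button _
    rw [fold_add_sum (fun b => 2 ^ (((state.length : Int) - b - 1).toNat)) button 0]
    simp
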